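-- pv_equiv track=rewrite | github.com/DianaWijaya/data-structures-and-algorithms | projects/boyer-moore-for-binary/boyer_moore_binary.py | bad_character_table_for_binary
-- ===== SOURCE A (Python) =====
-- def bad_character_table_for_binary(pattern):
--     """
--     Constructs the bad character table for the Boyer-Moore string matching algorithm for binary strings.
--
--     Parameters:
--         pattern (str): The pattern string for which the bad character table is built.
--
--     Returns:
--         List[List[int]]: A 2D list where index 0 corresponds to '0' and index 1 to '1'. Each row contains the
--                          last seen position of that character up to each index in the pattern.
--
--     Time Complexity:
--         O(m), where m is the length of the pattern.
--     """
--     m = len(pattern)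
--
--     # R[0] for '0', R[1] for '1'
--     R = [[-1] * m for _ in range(2)]
--
--     # Initialize last seen indices
--     prev_value = [-1, -1]
--
--     for j in range(m):
--
--         # Update the last occurrence of the current character
--         if pattern[j] == '0':
--             prev_value[0] = j
--         else:
--             prev_value[1] = j
--
--         # Copy last occurence values to R
--         R[0][j] = prev_value[0]
--         R[1][j] = prev_value[1]
--
--     return R
-- ===== SOURCE B (Python) =====
-- def bad_character_table_for_binary(pattern):
--     def prefix_max(xs):
--         out = []
--         cur = -1
--         for x in xs:
--             cur = max(cur, x)
--             out.append(cur)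
--         return out
--     marks0 = [j if c == '0' else -1 for j, c in enumerate(pattern)]
--     marks1 = [j if c != '0' else -1 for j, c in enumerate(pattern)]
--     return [prefix_max(marks0), prefix_max(marks1)]
-- ===== Notes on version B (the rewrite author's own statement) =====
-- stated objective: alternative
-- what changed: Replaces A's single interleaved pass carrying two last-seen scalars by, per row, a mark list (j on match, -1 otherwise) followed by a left-to-right prefix-maximum reduction.
import Mathlib
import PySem

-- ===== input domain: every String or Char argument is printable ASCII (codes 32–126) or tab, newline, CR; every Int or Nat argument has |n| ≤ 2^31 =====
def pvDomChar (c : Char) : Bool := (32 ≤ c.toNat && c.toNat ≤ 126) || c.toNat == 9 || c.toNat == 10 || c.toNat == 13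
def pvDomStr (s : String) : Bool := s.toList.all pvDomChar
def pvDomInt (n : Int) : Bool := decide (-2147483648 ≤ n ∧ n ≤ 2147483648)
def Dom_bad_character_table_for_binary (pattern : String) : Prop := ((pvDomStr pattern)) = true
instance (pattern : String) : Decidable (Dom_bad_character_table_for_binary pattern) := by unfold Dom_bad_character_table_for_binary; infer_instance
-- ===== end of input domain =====

-- B replaces A's single interleaved last-seen scan by two independent passes:
-- a mark list per row followed by a prefix-maximum reduction (objective: alternative).

-- ===== PORT A =====
-- one pass over enumerate(pattern), carrying the two last-seen indices and the two rows
def pvStepA (st : Int × Int × List Int × List Int) (jc : Int × Char) :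
    Int × Int × List Int × List Int :=
  let prev0 := if jc.2 = '0' then jc.1 else st.1
  let prev1 := if jc.2 = '0' then st.2.1 else jc.1
  (prev0, prev1, st.2.2.1 ++ [prev0], st.2.2.2 ++ [prev1])

def bad_character_table_for_binary (pattern : String) : List (List Int) :=
  let st := (PySem.List.enumerate pattern.toList).foldl pvStepA (-1, -1, [], [])
  [st.2.2.1, st.2.2.2]

-- ===== PORT B =====
def pvPmStep (st : Int × List Int) (x : Int) : Int × List Int :=
  let cur := max st.1 x
  (cur, st.2 ++ [cur])

def pvPrefixMax (xs : List Int) : List Int :=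
  (xs.foldl pvPmStep (-1, [])).2

def bad_character_table_for_binary_alt (pattern : String) : List (List Int) :=
  let cs := PySem.List.enumerate pattern.toList
  let marks0 := cs.map (fun jc => if jc.2 = '0' then jc.1 else -1)
  let marks1 := cs.map (fun jc => if jc.2 ≠ '0' then jc.1 else -1)
  [pvPrefixMax marks0, pvPrefixMax marks1]

-- ===== PRECONDITION & SPEC =====
def Spec_bad_character_table_for_binary (pattern : String) (out : List (List Int)) : Prop := out = bad_character_table_for_binary_alt pattern
instance (pattern : String) (out : List (List Int)) : Decidable (Spec_bad_character_table_for_binary pattern out) := by unfold Spec_bad_character_table_for_binary; infer_instance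

-- ===== CLAIM (what is proved, stated in full; the proofs are below) =====
def Claim_equal_bad_character_table_for_binary : Prop := ∀ (pattern : String), Dom_bad_character_table_for_binary pattern → Spec_bad_character_table_for_binary pattern (bad_character_table_for_binary pattern)

-- ===== LEMMAS AND PROOFS =====

lemma pv_key (l : List Char) : ∀ (k p0 p1 : Int) (r0 r1 : List Int),
    -1 ≤ p0 → -1 ≤ p1 → p0 < k → p1 < k →
    (PySem.List.enumerate l k).foldl pvStepA (p0, p1, r0, r1) =
      ((((PySem.List.enumerate l k).map (fun jc => if jc.2 = '0' then jc.1 else -1)).foldl pvPmStep (p0, r0)).1,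
       (((PySem.List.enumerate l k).map (fun jc => if jc.2 ≠ '0' then jc.1 else -1)).foldl pvPmStep (p1, r1)).1,
       (((PySem.List.enumerate l k).map (fun jc => if jc.2 = '0' then jc.1 else -1)).foldl pvPmStep (p0, r0)).2,
       (((PySem.List.enumerate l k).map (fun jc => if jc.2 ≠ '0' then jc.1 else -1)).foldl pvPmStep (p1, r1)).2) := by
  induction l with
  | nil => intro k p0 p1 r0 r1 _ _ _ _; simp [PySem.List.enumerate_nil]
  | cons c cs ih =>
    intro k p0 p1 r0 r1 h0 h1 h0k h1k
    simp only [PySem.List.enumerate_cons, List.map_cons, List.foldl_cons]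
    by_cases hc : c = '0'
    · have hm : max p0 k = k := max_eq_right (le_of_lt h0k)
      have hm1 : max p1 (-1) = p1 := max_eq_left h1
      simp only [pvStepA, pvPmStep, hc]
      norm_num [hm, hm1]
      simpa only [ne_eq, ite_not] using ih (k + 1) k p1 _ _ (by omega) h1 (by omega) (by omega)
    · have hm : max p1 k = k := max_eq_right (le_of_lt h1k)
      have hm0 : max p0 (-1) = p0 := max_eq_left h0
      simp only [pvStepA, pvPmStep, if_neg hc]
      norm_num [hc, hm, hm0]
      simpa only [ne_eq, ite_not] using ih (k + 1) p0 k _ _ h0 (by omega) (by omega) (by omega)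

-- ===== VERDICT (by name: the statement is the Claim_ definition above) =====
theorem bad_character_table_for_binary_spec : Claim_equal_bad_character_table_for_binary := by
  intro pattern _
  unfold Spec_bad_character_table_for_binary bad_character_table_for_binary
    bad_character_table_for_binary_alt pvPrefixMax
  rw [pv_key pattern.toList 0 (-1) (-1) [] [] (by omega) (by omega) (by omega) (by omega)]
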